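-- pv_equiv track=rewrite | github.com/Sheepiyoo/expendibots_B | other_resources/ok_boomer_tdleaf_self_play/calc_features.py | get_coverage
-- ===== SOURCE A (Python) =====
-- def get_coverage(stack):
--     area = set()
--     n, x, y = stack
--
--     for i in range(max(0, x - n - 1), min(x + n + 1, 7) + 1):
--         for j in range(max(0, y - 1), min(y + 1, 7) + 1):
--             area.add((i, j))
--
--     for j in range(max(0, y - n - 1), min(y + n + 1, 7) + 1):
--         for i in range(max(0, x - 1), min(x + 1, 7) + 1):
--             area.add((i, j))
--
--     return area
-- ===== SOURCE B (Python) =====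
-- def get_coverage(stack):
--     n, x, y = stack
--
--     def horiz(i, j):
--         return x - n - 1 <= i <= x + n + 1 and y - 1 <= j <= y + 1
--
--     def vert(i, j):
--         return y - n - 1 <= j <= y + n + 1 and x - 1 <= i <= x + 1
--
--     cells = [(i, j) for i in range(8) for j in range(8) if horiz(i, j)]
--     cells += [(i, j) for j in range(8) for i in range(8)
--               if vert(i, j) and not horiz(i, j)]
--     return set(cells)
-- ===== Notes on version B (the rewrite author's own statement) =====
-- stated objective: alternative
-- what changed: Instead of painting two clamped rectangles into a mutable set, B scans the fixed 8x8 board with arithmetic membership predicates for the horizontal and vertical arms (no max/min clamping, no mutable set), listing each covered cell exactly once.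
import Mathlib
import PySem

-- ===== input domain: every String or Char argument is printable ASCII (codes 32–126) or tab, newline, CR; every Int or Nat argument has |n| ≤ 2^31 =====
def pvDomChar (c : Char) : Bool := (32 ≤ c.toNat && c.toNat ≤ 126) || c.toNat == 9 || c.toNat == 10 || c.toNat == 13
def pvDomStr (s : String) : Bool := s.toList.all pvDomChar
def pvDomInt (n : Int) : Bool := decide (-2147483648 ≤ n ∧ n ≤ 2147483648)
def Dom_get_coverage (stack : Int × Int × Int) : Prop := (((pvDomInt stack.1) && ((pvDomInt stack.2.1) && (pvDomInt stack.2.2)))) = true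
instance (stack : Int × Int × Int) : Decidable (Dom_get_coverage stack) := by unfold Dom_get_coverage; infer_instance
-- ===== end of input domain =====

-- B scans the fixed 8x8 board with arithmetic arm-membership predicates instead of
-- painting two clamped rectangles into a mutable set; objective: alternative, no speed claim.

-- ===== PORT A =====
def get_coverage (stack : Int × Int × Int) : List (Int × Int) :=
  let n := stack.1
  let x := stack.2.1
  let y := stack.2.2
  let area : PySem.Set (Int × Int) := PySem.Set.empty
  let area := (PySem.List.pyRange (max 0 (x - n - 1)) (min (x + n + 1) 7 + 1) 1).foldl
    (fun area i =>
      (PySem.List.pyRange (max 0 (y - 1)) (min (y + 1) 7 + 1) 1).foldl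
        (fun area j => PySem.Set.add area (i, j)) area) area
  let area := (PySem.List.pyRange (max 0 (y - n - 1)) (min (y + n + 1) 7 + 1) 1).foldl
    (fun area j =>
      (PySem.List.pyRange (max 0 (x - 1)) (min (x + 1) 7 + 1) 1).foldl
        (fun area i => PySem.Set.add area (i, j)) area) area
  area

-- ===== PORT B =====
def get_coverage_alt (stack : Int × Int × Int) : List (Int × Int) :=
  let n := stack.1
  let x := stack.2.1
  let y := stack.2.2
  let horiz := fun (i j : Int) =>
    (decide (x - n - 1 ≤ i) && decide (i ≤ x + n + 1)) &&
    (decide (y - 1 ≤ j) && decide (j ≤ y + 1))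
  let vert := fun (i j : Int) =>
    (decide (y - n - 1 ≤ j) && decide (j ≤ y + n + 1)) &&
    (decide (x - 1 ≤ i) && decide (i ≤ x + 1))
  let cells := (PySem.List.pyRange 0 8 1).flatMap
    (fun i => ((PySem.List.pyRange 0 8 1).filter (fun j => horiz i j)).map (fun j => (i, j)))
  let cells := cells ++ (PySem.List.pyRange 0 8 1).flatMap
    (fun j => ((PySem.List.pyRange 0 8 1).filter (fun i => vert i j && !horiz i j)).map
      (fun i => (i, j)))
  PySem.Set.ofList cells

-- ===== PRECONDITION & SPEC =====
def Spec_get_coverage (stack : Int × Int × Int) (out : List (Int × Int)) : Prop := out = get_coverage_alt stack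
instance (stack : Int × Int × Int) (out : List (Int × Int)) : Decidable (Spec_get_coverage stack out) := by unfold Spec_get_coverage; infer_instance

-- ===== CLAIM (what is proved, stated in full; the proofs are below) =====
def Claim_equal_get_coverage : Prop := ∀ (stack : Int × Int × Int), Dom_get_coverage stack → Spec_get_coverage stack (get_coverage stack)

-- ===== LEMMAS AND PROOFS =====

-- two strictly increasing Int lists with the same members are equal
theorem eq_of_pairwise_lt_mem {l₁ l₂ : List Int} (h1 : l₁.Pairwise (· < ·))
    (h2 : l₂.Pairwise (· < ·)) (hm : ∀ x, x ∈ l₁ ↔ x ∈ l₂) : l₁ = l₂ := by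
  have hp : l₁.Perm l₂ := by
    refine (List.perm_ext_iff_of_nodup ?_ ?_).mpr hm
    · exact h1.imp ne_of_lt
    · exact h2.imp ne_of_lt
  exact List.Perm.eq_of_pairwise (fun a b _ _ ha hb => absurd ha (lt_asymm hb)) h1 h2 hp

-- filtering the full board row by the unclamped arm bounds gives A's clamped range
theorem range08_filter (a b : Int) :
    (PySem.List.pyRange 0 8 1).filter (fun t => decide (a ≤ t) && decide (t ≤ b))
      = PySem.List.pyRange (max 0 a) (min b 7 + 1) 1 := by
  refine eq_of_pairwise_lt_mem ((PySem.List.pairwise_lt_pyRange_one 0 8).filter _)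
    (PySem.List.pairwise_lt_pyRange_one _ _) ?_
  intro t
  simp only [List.mem_filter, PySem.List.mem_pyRange_one, Bool.and_eq_true, decide_eq_true_eq]
  omega

-- flatMap over the board with an i-dependent guard = flatMap over the filtered rows
theorem flatMap_guard {β : Type} (xs : List Int) (p : Int → Bool) (f : Int → List β) :
    xs.flatMap (fun i => if p i then f i else []) = (xs.filter p).flatMap f := by
  induction xs with
  | nil => rfl
  | cons a t ih =>
    by_cases h : p a = true <;> simp [List.flatMap_cons, h, ih]

-- nested add-loop = Set.update with the flatMap product list
theorem foldl_update_flatMap (xs : List Int) (g : Int → List (Int × Int))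
    (s : PySem.Set (Int × Int)) :
    xs.foldl (fun s x => PySem.Set.update s (g x)) s = PySem.Set.update s (xs.flatMap g) := by
  induction xs generalizing s with
  | nil => simp [PySem.Set.update]
  | cons a xs ih => simp [List.foldl_cons, ih, PySem.Set.update_append]

theorem foldl_nested_fst (xs ys : List Int) (s : PySem.Set (Int × Int)) :
    xs.foldl (fun s i => ys.foldl (fun s j => PySem.Set.add s (i, j)) s) s
      = PySem.Set.update s (xs.flatMap (fun i => ys.map (fun j => (i, j)))) := by
  rw [← foldl_update_flatMap]
  refine PySem.List.foldl_congr_mem _ _ _ _ ?_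
  intro acc i _
  exact (PySem.Set.update_map_eq_foldl_add ..).symm

theorem foldl_nested_snd (ys xs : List Int) (s : PySem.Set (Int × Int)) :
    ys.foldl (fun s j => xs.foldl (fun s i => PySem.Set.add s (i, j)) s) s
      = PySem.Set.update s (ys.flatMap (fun j => xs.map (fun i => (i, j)))) := by
  rw [← foldl_update_flatMap]
  refine PySem.List.foldl_congr_mem _ _ _ _ ?_
  intro acc j _
  exact (PySem.Set.update_map_eq_foldl_add ..).symm

-- updating a duplicate-free list appends exactly its not-yet-present elements
theorem update_eq_append_filter (l : List (Int × Int)) (s : List (Int × Int)) (hl : l.Nodup) :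
    PySem.Set.update s l = s ++ l.filter (fun a => !decide (a ∈ s)) := by
  induction l generalizing s with
  | nil => simp [PySem.Set.update]
  | cons a l ih =>
    rw [PySem.Set.update_cons]
    by_cases h : a ∈ s
    · rw [show PySem.Set.add s a = s by simp [PySem.Set.add, h]]
      rw [ih s hl.of_cons]
      simp [h]
    · rw [show PySem.Set.add s a = s ++ [a] by simp [PySem.Set.add, h]]
      rw [ih (s ++ [a]) hl.of_cons]
      have hfe : l.filter (fun b => !decide (b ∈ s ++ [a])) = l.filter (fun b => !decide (b ∈ s)) := by
        apply List.filter_congr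
        intro b hb
        have hba : b ≠ a := fun he => (List.nodup_cons.mp hl).1 (he ▸ hb)
        simp [hba]
      rw [hfe]
      simp [h]

-- product-shaped pair lists are duplicate-free
theorem nodup_pairs_fst (xs ys : List Int) (hx : xs.Nodup) (hy : ys.Nodup) :
    (xs.flatMap (fun i => ys.map (fun j => ((i, j) : Int × Int)))).Nodup := by
  induction xs with
  | nil => simp
  | cons a xs ih =>
    have hx' := List.nodup_cons.mp hx
    simp only [List.flatMap_cons]
    refine List.Nodup.append (hy.map ?_) (ih hx'.2) ?_
    · intro u v h; exact (Prod.mk.injEq _ _ _ _ ▸ h).2 ▸ rfl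
    · intro p hp hq
      obtain ⟨j, hj, rfl⟩ := List.mem_map.mp hp
      obtain ⟨i, hi, hm⟩ := List.mem_flatMap.mp hq
      obtain ⟨j', hj', heq⟩ := List.mem_map.mp hm
      have hia : i = a := ((Prod.mk.injEq _ _ _ _).mp heq).1
      exact hx'.1 (hia ▸ hi)

theorem nodup_pairs_snd (ys xs : List Int) (hy : ys.Nodup) (hx : xs.Nodup) :
    (ys.flatMap (fun j => xs.map (fun i => ((i, j) : Int × Int)))).Nodup := by
  induction ys with
  | nil => simp
  | cons a ys ih =>
    have hy' := List.nodup_cons.mp hy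
    simp only [List.flatMap_cons]
    refine List.Nodup.append (hx.map ?_) (ih hy'.2) ?_
    · intro u v h; exact (Prod.mk.injEq _ _ _ _ ▸ h).1 ▸ rfl
    · intro p hp hq
      obtain ⟨i, hi, rfl⟩ := List.mem_map.mp hp
      obtain ⟨j, hj, hm⟩ := List.mem_flatMap.mp hq
      obtain ⟨i', hi', heq⟩ := List.mem_map.mp hm
      have hja : j = a := ((Prod.mk.injEq _ _ _ _).mp heq).2
      exact hy'.1 (hja ▸ hj)

theorem mem_pairs_fst (xs ys : List Int) (p : Int × Int) :
    p ∈ xs.flatMap (fun i => ys.map (fun j => ((i, j) : Int × Int))) ↔ p.1 ∈ xs ∧ p.2 ∈ ys := by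
  obtain ⟨a, b⟩ := p
  constructor
  · intro h
    obtain ⟨i, hi, hm⟩ := List.mem_flatMap.mp h
    obtain ⟨j, hj, heq⟩ := List.mem_map.mp hm
    obtain ⟨h1, h2⟩ := (Prod.mk.injEq _ _ _ _).mp heq
    exact ⟨h1 ▸ hi, h2 ▸ hj⟩
  · rintro ⟨h1, h2⟩
    exact List.mem_flatMap.mpr ⟨a, h1, List.mem_map.mpr ⟨b, h2, rfl⟩⟩

theorem pairs_eq (stack : Int × Int × Int) : get_coverage stack = get_coverage_alt stack := by
  obtain ⟨n, x, y⟩ := stack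
  set RI1 := PySem.List.pyRange (max 0 (x - n - 1)) (min (x + n + 1) 7 + 1) 1 with hRI1
  set RJ1 := PySem.List.pyRange (max 0 (y - 1)) (min (y + 1) 7 + 1) 1 with hRJ1
  set RJ2 := PySem.List.pyRange (max 0 (y - n - 1)) (min (y + n + 1) 7 + 1) 1 with hRJ2
  set RI2 := PySem.List.pyRange (max 0 (x - 1)) (min (x + 1) 7 + 1) 1 with hRI2
  set rect1 := RI1.flatMap (fun i => RJ1.map (fun j => ((i, j) : Int × Int))) with hrect1
  set rect2 := RJ2.flatMap (fun j => RI2.map (fun i => ((i, j) : Int × Int))) with hrect2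
  have hn1 : rect1.Nodup := nodup_pairs_fst _ _ (PySem.List.nodup_pyRange_one _ _) (PySem.List.nodup_pyRange_one _ _)
  have hn2 : rect2.Nodup := nodup_pairs_snd _ _ (PySem.List.nodup_pyRange_one _ _) (PySem.List.nodup_pyRange_one _ _)
  have hmem1 : ∀ p : Int × Int, p ∈ rect1 ↔
      ((max 0 (x - n - 1) ≤ p.1 ∧ p.1 ≤ min (x + n + 1) 7) ∧
       (max 0 (y - 1) ≤ p.2 ∧ p.2 ≤ min (y + 1) 7)) := by
    intro p
    rw [hrect1, mem_pairs_fst, hRI1, hRJ1]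
    simp only [PySem.List.mem_pyRange_one]
    omega
  -- A side: the two painting loop nests are Set.update by the two product lists
  have hA : get_coverage (n, x, y) =
      PySem.Set.update (PySem.Set.update PySem.Set.empty rect1) rect2 := by
    show (RJ2.foldl _ (RI1.foldl _ PySem.Set.empty)) = _
    rw [foldl_nested_fst, foldl_nested_snd, ← hrect1, ← hrect2]
  have hgate : ∀ (ic : Bool) (jc : Int → Bool),
      (PySem.List.pyRange 0 8 1).filter (fun j => ic && jc j)
        = if ic then (PySem.List.pyRange 0 8 1).filter jc else [] := by
    intro ic jc
    cases ic <;> simp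
  -- B side: the first board scan is rect1, the second is rect2 filtered by not-in-rect1
  have hscan1 : (PySem.List.pyRange 0 8 1).flatMap
      (fun i => ((PySem.List.pyRange 0 8 1).filter (fun j =>
        (decide (x - n - 1 ≤ i) && decide (i ≤ x + n + 1)) &&
        (decide (y - 1 ≤ j) && decide (j ≤ y + 1)))).map (fun j => ((i, j) : Int × Int)))
      = rect1 := by
    have hrow : ∀ i : Int,
        ((PySem.List.pyRange 0 8 1).filter (fun j =>
          (decide (x - n - 1 ≤ i) && decide (i ≤ x + n + 1)) &&
          (decide (y - 1 ≤ j) && decide (j ≤ y + 1)))).map (fun j => ((i, j) : Int × Int))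
        = if (decide (x - n - 1 ≤ i) && decide (i ≤ x + n + 1)) then
            RJ1.map (fun j => ((i, j) : Int × Int)) else [] := by
      intro i
      rw [hgate, hRJ1, ← range08_filter]
      split <;> rfl
    rw [List.flatMap_congr (fun i _ => hrow i), flatMap_guard, range08_filter, ← hRI1, hrect1]
  have hscan2 : (PySem.List.pyRange 0 8 1).flatMap
      (fun j => ((PySem.List.pyRange 0 8 1).filter (fun i =>
        ((decide (y - n - 1 ≤ j) && decide (j ≤ y + n + 1)) &&
         (decide (x - 1 ≤ i) && decide (i ≤ x + 1))) &&
        !((decide (x - n - 1 ≤ i) && decide (i ≤ x + n + 1)) &&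
          (decide (y - 1 ≤ j) && decide (j ≤ y + 1))))).map (fun i => ((i, j) : Int × Int)))
      = rect2.filter (fun p => !decide (p ∈ rect1)) := by
    have hcol : ∀ j : Int,
        ((PySem.List.pyRange 0 8 1).filter (fun i =>
          ((decide (y - n - 1 ≤ j) && decide (j ≤ y + n + 1)) &&
           (decide (x - 1 ≤ i) && decide (i ≤ x + 1))) &&
          !((decide (x - n - 1 ≤ i) && decide (i ≤ x + n + 1)) &&
            (decide (y - 1 ≤ j) && decide (j ≤ y + 1))))).map (fun i => ((i, j) : Int × Int))
        = if (decide (y - n - 1 ≤ j) && decide (j ≤ y + n + 1)) then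
            (RI2.filter (fun i =>
              !((decide (x - n - 1 ≤ i) && decide (i ≤ x + n + 1)) &&
                (decide (y - 1 ≤ j) && decide (j ≤ y + 1))))).map
              (fun i => ((i, j) : Int × Int)) else [] := by
      intro j
      rw [show ((PySem.List.pyRange 0 8 1).filter (fun i =>
          ((decide (y - n - 1 ≤ j) && decide (j ≤ y + n + 1)) &&
           (decide (x - 1 ≤ i) && decide (i ≤ x + 1))) &&
          !((decide (x - n - 1 ≤ i) && decide (i ≤ x + n + 1)) &&
            (decide (y - 1 ≤ j) && decide (j ≤ y + 1)))))
        = ((PySem.List.pyRange 0 8 1).filter (fun i =>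
          (decide (y - n - 1 ≤ j) && decide (j ≤ y + n + 1)) &&
          ((decide (x - 1 ≤ i) && decide (i ≤ x + 1)) &&
           !((decide (x - n - 1 ≤ i) && decide (i ≤ x + n + 1)) &&
             (decide (y - 1 ≤ j) && decide (j ≤ y + 1)))))) from
        List.filter_congr (fun i _ => by
          cases decide (y - n - 1 ≤ j) <;> cases decide (j ≤ y + n + 1) <;>
          cases decide (x - 1 ≤ i) <;> cases decide (i ≤ x + 1) <;> simp)]
      rw [hgate]
      split
      · congr 1
        rw [hRI2, ← range08_filter, List.filter_filter]
        exact List.filter_congr (fun a _ => by rw [Bool.and_comm])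
      · rfl
    rw [List.flatMap_congr (fun j _ => hcol j), flatMap_guard, range08_filter, ← hRJ2,
        hrect2, List.filter_flatMap]
    refine List.flatMap_congr ?_
    intro j hj
    have hjb : max 0 (y - n - 1) ≤ j ∧ j < min (y + n + 1) 7 + 1 :=
      (PySem.List.mem_pyRange_one).mp (hRJ2 ▸ hj)
    rw [List.filter_map]
    refine congrArg (List.map _) (List.filter_congr ?_)
    intro i hi
    have hib : max 0 (x - 1) ≤ i ∧ i < min (x + 1) 7 + 1 :=
      (PySem.List.mem_pyRange_one).mp (hRI2 ▸ hi)
    have hb : (decide (((i, j) : Int × Int) ∈ rect1)) =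
        ((decide (x - n - 1 ≤ i) && decide (i ≤ x + n + 1)) &&
         (decide (y - 1 ≤ j) && decide (j ≤ y + 1))) := by
      simp only [← Bool.decide_and, decide_eq_decide]
      rw [hmem1 (i, j)]
      constructor <;> intro <;> simp_all
    simp only [Function.comp_apply, hb]
  have hB : get_coverage_alt (n, x, y) =
      PySem.Set.ofList (rect1 ++ rect2.filter (fun p => !decide (p ∈ rect1))) := by
    show PySem.Set.ofList _ = _
    rw [hscan1, hscan2]
  have hnd : (rect1 ++ rect2.filter (fun p => !decide (p ∈ rect1))).Nodup := by
    refine List.Nodup.append hn1 (hn2.filter _) ?_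
    intro p hp hq
    have h := List.of_mem_filter hq
    simp only [Bool.not_eq_true', decide_eq_false_iff_not] at h
    exact h hp
  rw [hA, hB, PySem.Set.update_empty, PySem.Set.ofList_eq_self_of_nodup rect1 hn1,
      update_eq_append_filter rect2 rect1 hn2]
  exact (PySem.Set.ofList_eq_self_of_nodup _ hnd).symm

-- ===== VERDICT (by name: the statement is the Claim_ definition above) =====
theorem get_coverage_spec : Claim_equal_get_coverage := by
  intro stack _
  unfold Spec_get_coverage
  exact pairs_eq stack
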